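-- pv_equiv track=rewrite | github.com/tlensk/PAT | TT_clusters.py | MaskAlign
-- ===== SOURCE A (Python) =====
-- def MaskAlign(seq, st, fn):
--     n = len(seq)
--     if (st < 0) or (fn >= n):
--         return ""
--     s = ""
--     for i in range(n):
--         if (i < st) or (i > fn):
--             s = s+"."
--         else:
--             s = s+seq[i]
--     return s
-- ===== SOURCE B (Python) =====
-- def MaskAlign(seq, st, fn):
--     n = len(seq)
--     if st < 0 or fn >= n:
--         return ""
--     lo = min(st, n)           # clamp start into [0, n]
--     hi = max(fn + 1, lo)      # end of kept window; fn < n so fn+1 <= n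
--     return "." * lo + seq[lo:hi] + "." * (n - hi)
-- ===== Notes on version B (the rewrite author's own statement) =====
-- stated objective: faster
-- what changed: Replaced the per-character index loop with quadratic string accumulation by a closed-form assembly: a clamped slice seq[lo:hi] surrounded by computed runs of dots.
import Mathlib
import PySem

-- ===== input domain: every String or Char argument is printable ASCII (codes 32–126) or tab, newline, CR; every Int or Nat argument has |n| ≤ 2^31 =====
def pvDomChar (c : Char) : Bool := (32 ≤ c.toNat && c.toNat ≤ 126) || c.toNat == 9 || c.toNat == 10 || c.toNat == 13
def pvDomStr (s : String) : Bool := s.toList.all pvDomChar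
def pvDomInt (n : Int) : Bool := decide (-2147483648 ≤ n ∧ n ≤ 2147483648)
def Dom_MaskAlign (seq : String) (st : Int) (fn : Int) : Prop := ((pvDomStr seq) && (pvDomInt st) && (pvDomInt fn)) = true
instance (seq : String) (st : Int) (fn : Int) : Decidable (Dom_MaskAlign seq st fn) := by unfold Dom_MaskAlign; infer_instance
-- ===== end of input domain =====

-- B replaces A's per-character loop by a closed-form assembly (dots ++ clamped slice ++ dots); return value only, no mutation.

-- ===== PORT A =====
-- literal port: guard, then a fold over range(n) appending '.' or seq[i]
def MaskAlign (seq : String) (st : Int) (fn : Int) : String :=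
  if st < 0 ∨ fn ≥ (seq.toList.length : Int) then "" else
  String.ofList ((PySem.List.pyRange 0 (seq.toList.length : Int) 1).foldl
    (fun s i => if i < st ∨ i > fn then s ++ ['.']
                else s ++ (PySem.List.pyGet? seq.toList i).toList) [])

-- ===== PORT B =====
-- closed form: "."*lo ++ seq[lo:hi] ++ "."*(n-hi) with lo = min st n, hi = max (fn+1) lo
def MaskAlign_alt (seq : String) (st : Int) (fn : Int) : String :=
  if st < 0 ∨ fn ≥ (seq.toList.length : Int) then "" else
  String.ofList
    (List.replicate (min st (seq.toList.length : Int)).toNat '.'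
     ++ PySem.List.slice seq.toList (some (min st (seq.toList.length : Int)))
          (some (max (fn + 1) (min st (seq.toList.length : Int))))
     ++ List.replicate ((seq.toList.length : Int) - max (fn + 1) (min st (seq.toList.length : Int))).toNat '.')

-- ===== PRECONDITION & SPEC =====
def Spec_MaskAlign (seq : String) (st : Int) (fn : Int) (out : String) : Prop := out = MaskAlign_alt seq st fn
instance (seq : String) (st : Int) (fn : Int) (out : String) : Decidable (Spec_MaskAlign seq st fn out) := by unfold Spec_MaskAlign; infer_instance

-- ===== CLAIM (what is proved, stated in full; the proofs are below) =====
def Claim_equal_MaskAlign : Prop := ∀ (seq : String) (st : Int) (fn : Int), Dom_MaskAlign seq st fn → Spec_MaskAlign seq st fn (MaskAlign seq st fn)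

-- ===== LEMMAS AND PROOFS =====

lemma pv_flatMap_eq_map {α β : Type} (l : List α) (g : α → List β) (h : α → β)
    (hg : ∀ x ∈ l, g x = [h x]) : l.flatMap g = l.map h := by
  induction l with
  | nil => rfl
  | cons x xs ih =>
    simp only [List.flatMap_cons, List.map_cons, hg x (by simp)]
    rw [ih (fun y hy => hg y (by simp [hy]))]
    rfl

lemma pv_mask_lists (cs : List Char) (st fn : Int) (hst : 0 ≤ st) (hfn : fn < (cs.length : Int)) :
    (PySem.List.pyRange 0 (cs.length : Int) 1).foldl
      (fun s i => if i < st ∨ i > fn then s ++ ['.'] else s ++ (PySem.List.pyGet? cs i).toList) []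
    = List.replicate (min st (cs.length : Int)).toNat '.'
      ++ PySem.List.slice cs (some (min st (cs.length : Int)))
           (some (max (fn + 1) (min st (cs.length : Int))))
      ++ List.replicate ((cs.length : Int) - max (fn + 1) (min st (cs.length : Int))).toNat '.' := by
  set N := cs.length with hN
  set lo : Int := min st (N : Int) with hlo
  set hi : Int := max (fn + 1) lo with hhi
  have hlo0 : 0 ≤ lo := by omega
  have hhi0 : 0 ≤ hi := by omega
  set a : Nat := lo.toNat with ha
  set b : Nat := hi.toNat with hb
  have hab : a ≤ b := by omega
  have hbN : b ≤ N := by omega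
  -- step 1: the loop body is acc ++ g i
  have h1 : (fun (s : List Char) (i : Int) =>
        if i < st ∨ i > fn then s ++ ['.'] else s ++ (PySem.List.pyGet? cs i).toList)
      = fun s i => s ++ (if i < st ∨ i > fn then ['.'] else (PySem.List.pyGet? cs i).toList) := by
    funext s i; split <;> rfl
  -- step 2: the flatMap over the range is a map producing one char per index
  have hflat : (PySem.List.pyRange 0 (N : Int) 1).flatMap
        (fun i => if i < st ∨ i > fn then ['.'] else (PySem.List.pyGet? cs i).toList)
      = (List.range N).map
          (fun (k : Nat) => if (k : Int) < st ∨ (k : Int) > fn then '.' else cs.getD k '.') := by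
    rw [PySem.List.pyRange_one, List.flatMap_map]
    apply pv_flatMap_eq_map
    intro k hk
    have hkN : k < N := by
      have := List.mem_range.mp hk
      omega
    simp only [zero_add]
    rw [PySem.List.pyGet?_natCast]
    by_cases hc : (k : Int) < st ∨ (k : Int) > fn
    · rw [if_pos hc, if_pos hc]
    · rw [if_neg hc, if_neg hc, List.getElem?_eq_getElem hkN, Option.toList_some,
        List.getD_eq_getElem cs '.' hkN]
  rw [h1, PySem.List.foldl_append_eq_flatMap, List.nil_append, hflat]
  -- step 3: rewrite the slice as drop/take
  rw [PySem.List.slice_toNat cs hlo0 hhi0]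
  rw [show hi.toNat = b from rfl, show lo.toNat = a from rfl]
  -- step 4: element-wise equality
  apply List.ext_getElem
  · simp only [List.length_map, List.length_range, List.length_append, List.length_replicate,
      List.length_take, List.length_drop]
    omega
  · intro i h1' h2'
    simp only [List.length_map, List.length_range] at h1'
    have hiN : i < N := h1'
    simp only [List.getElem_map, List.getElem_range, List.append_assoc]
    rcases lt_or_ge i a with hia | hia
    · -- leading dots: i < a ⇒ i < st
      have hcond : (i : Int) < st ∨ (i : Int) > fn := by left; omega
      rw [List.getElem_append_left (by simpa using hia)]
      simp [hcond]
    · rcases lt_or_ge i b with hib | hib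
      · -- middle: the character itself
        have hc1 : ¬ ((i : Int) < st ∨ (i : Int) > fn) := by
          rw [not_or]
          constructor <;> [skip; skip] <;> omega
        rw [List.getElem_append_right (by simpa using hia)]
        have hmidlen : i - (List.replicate a '.').length < ((cs.drop a).take (b - a)).length := by
          simp only [List.length_replicate, List.length_take, List.length_drop]
          omega
        rw [List.getElem_append_left hmidlen]
        simp only [List.length_replicate, List.getElem_take, List.getElem_drop]
        rw [if_neg hc1]
        have hidx : a + (i - a) = i := by omega
        simp only [hidx]
        exact List.getD_eq_getElem cs '.' hiN
      · -- trailing dots: b ≤ i ⇒ fn < i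
        have hcond : (i : Int) < st ∨ (i : Int) > fn := by right; omega
        rw [List.getElem_append_right (by simpa using hia)]
        have hge2 : (List.take (b - a) (List.drop a cs)).length ≤ i - (List.replicate a '.').length := by
          simp only [List.length_replicate, List.length_take, List.length_drop]
          omega
        rw [List.getElem_append_right hge2]
        simp [hcond]

-- ===== VERDICT (by name: the statement is the Claim_ definition above) =====
theorem MaskAlign_spec : Claim_equal_MaskAlign := by
  intro seq st fn _
  unfold Spec_MaskAlign MaskAlign MaskAlign_alt
  by_cases hg : st < 0 ∨ fn ≥ (seq.toList.length : Int)
  · rw [if_pos hg, if_pos hg]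
  · rw [if_neg hg, if_neg hg]
    rw [not_or, not_lt, not_le] at hg
    exact congrArg String.ofList (pv_mask_lists seq.toList st fn hg.1 hg.2)
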